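-- pv_equiv track=rewrite | github.com/youtube/cobalt | tools/clang/scripts/compiler_inputs_size_diff.py | diff_tu_sizes
-- ===== SOURCE A (Python) =====
-- from typing import Dict, Iterable
--
-- def diff_tu_sizes(d1: Dict[str, int], d2: Dict[str, int]) -> Dict[str, int]:
--   r"""Calculate the size diff for each translation unit between two reports.
--
--   Args:
--     d1: dict mapping translation unit paths to their sizes from the
--         first report.
--     d2: dict mapping translation unit paths to their sizes from the
--         second report.
--
--   Returns:
--     A dictionary mapping translation unit paths to their size differences.
--     Includes entries for all TUs present in either report.
--
--   >>> diff_tu_sizes(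
--   ...   {'foo.cc': 1234, 'bar.cc': 5678},
--   ...   {'foo.cc': 1200, 'baz.cc': 9012})
--   {'foo.cc': -34, 'bar.cc': -5678, 'baz.cc': 9012}
--   """
--   size_diffs = {}
--   for path, size in d1.items():
--     size_diffs[path] = d2.get(path, 0) - size
--   remaining_keys = set(d2) - set(d1)
--   for path in remaining_keys:
--     size_diffs[path] = d2[path]
--   return size_diffs
-- ===== SOURCE B (Python) =====
-- def diff_tu_sizes(d1, d2):
--   # Signed-delta aggregation: concatenate d1's entries negated with d2's entries,
--   # then fold the delta stream into an accumulator (Counter-style), so neither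
--   # input dict is ever looked up.
--   deltas = [(path, -size) for path, size in d1.items()]
--   deltas += d2.items()
--   acc = {}
--   for path, dv in deltas:
--     acc[path] = acc.get(path, 0) + dv
--   return acc
-- ===== Notes on version B (the rewrite author's own statement) =====
-- stated objective: alternative
-- what changed: B replaces A's per-key lookups (d2.get inside a loop over d1, then a set-difference loop indexing d2) with a signed-delta aggregation: it concatenates d1's entries negated with d2's entries and folds that single delta stream into an accumulator with acc[k]=acc.get(k,0)+dv, never looking up either input dict.
import Mathlib
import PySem

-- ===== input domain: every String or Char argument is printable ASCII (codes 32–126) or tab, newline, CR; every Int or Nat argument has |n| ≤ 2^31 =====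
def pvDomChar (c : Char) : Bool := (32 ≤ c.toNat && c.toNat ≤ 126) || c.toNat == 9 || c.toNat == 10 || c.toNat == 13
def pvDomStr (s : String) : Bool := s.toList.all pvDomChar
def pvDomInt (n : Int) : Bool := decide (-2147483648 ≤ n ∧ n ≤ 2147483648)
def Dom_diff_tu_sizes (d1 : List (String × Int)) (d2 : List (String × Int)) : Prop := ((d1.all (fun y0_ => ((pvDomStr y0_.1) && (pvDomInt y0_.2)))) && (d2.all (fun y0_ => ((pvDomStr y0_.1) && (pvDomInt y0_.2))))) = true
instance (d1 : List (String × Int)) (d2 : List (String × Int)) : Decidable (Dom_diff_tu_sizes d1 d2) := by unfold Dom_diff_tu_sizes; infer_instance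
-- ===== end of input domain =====

-- B computes the diff as a signed-delta aggregation: one fold over d1's entries negated
-- followed by d2's entries, with acc[k] = acc.get(k,0)+dv, never looking up either input
-- dict; objective: alternative (same cost, different algorithm).
-- Dict arguments/results follow the convention (assoc list, normalised via Dict.ofList);
-- dict outputs are compared ignoring insertion order, as Python dict == does.

-- ===== PORT A =====
def diff_tu_sizes (d1 : List (String × Int)) (d2 : List (String × Int)) : List (String × Int) :=
  let D1 := PySem.Dict.ofList d1
  let D2 := PySem.Dict.ofList d2
  -- size_diffs = {}; for path, size in d1.items(): size_diffs[path] = d2.get(path, 0) - size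
  let sd := D1.items.foldl (fun d p => d.insert p.1 (D2.getD p.1 0 - p.2)) PySem.Dict.empty
  -- remaining_keys = set(d2) - set(d1)
  let remaining := PySem.Set.diff (PySem.Set.ofList D2.keys) (PySem.Set.ofList D1.keys)
  -- for path in remaining_keys: size_diffs[path] = d2[path]
  -- (d2[path]: the key is guaranteed present, so d2[path] = d2.get(path, 0); no KeyError)
  let sd := remaining.foldl (fun d k => d.insert k (D2.getD k 0)) sd
  sd.items

-- ===== PORT B =====
def diff_tu_sizes_alt (d1 : List (String × Int)) (d2 : List (String × Int)) : List (String × Int) :=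
  let D1 := PySem.Dict.ofList d1
  let D2 := PySem.Dict.ofList d2
  -- deltas = [(path, -size) for path, size in d1.items()]; deltas += d2.items()
  let deltas := D1.items.map (fun p => (p.1, -p.2)) ++ D2.items
  -- acc = {}; for path, dv in deltas: acc[path] = acc.get(path, 0) + dv
  let acc := deltas.foldl (fun d p => d.insert p.1 (d.getD p.1 0 + p.2)) PySem.Dict.empty
  acc.items

-- ===== PRECONDITION & SPEC =====
def Spec_diff_tu_sizes (d1 : List (String × Int)) (d2 : List (String × Int)) (out : List (String × Int)) : Prop := out = diff_tu_sizes_alt d1 d2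
instance (d1 : List (String × Int)) (d2 : List (String × Int)) (out : List (String × Int)) : Decidable (Spec_diff_tu_sizes d1 d2 out) := by unfold Spec_diff_tu_sizes; infer_instance

-- ===== CLAIM (what is proved, stated in full; the proofs are below) =====
def Claim_equal_diff_tu_sizes : Prop := ∀ (d1 : List (String × Int)) (d2 : List (String × Int)), Dom_diff_tu_sizes d1 d2 → Spec_diff_tu_sizes d1 d2 (diff_tu_sizes d1 d2)

-- ===== LEMMAS AND PROOFS =====

-- first value bound to key k in an assoc list, default 0 (proof-side notion only)
def pvLookup (l : List (String × Int)) (k : String) : Int :=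
  (((l.find? (fun p => p.1 == k)).map (·.2)).getD 0)

theorem pvLookup_nil (k : String) : pvLookup [] k = 0 := rfl

theorem pvLookup_cons (p : String × Int) (l : List (String × Int)) (k : String) :
    pvLookup (p :: l) k = if p.1 = k then p.2 else pvLookup l k := by
  by_cases h : p.1 = k
  · simp [pvLookup, List.find?_cons_of_pos, h]
  · rw [pvLookup, List.find?_cons_of_neg (l := l) (by simp [h]), if_neg h]; rfl

theorem pvLookup_not_mem (l : List (String × Int)) (k : String)
    (h : k ∉ l.map (·.1)) : pvLookup l k = 0 := by
  induction l with
  | nil => rfl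
  | cons p l ih =>
    rw [pvLookup_cons]
    simp only [List.map_cons, List.mem_cons] at h
    push Not at h
    rw [if_neg (fun hh => h.1 hh.symm)]
    exact ih h.2

theorem pvLookup_items (d : PySem.Dict String Int) (k : String) :
    pvLookup d.items k = d.getD k 0 := by
  obtain ⟨l⟩ := d
  rw [PySem.Dict.getD_eq_get?_getD]
  induction l with
  | nil => rfl
  | cons p l ih =>
    obtain ⟨pk, pv⟩ := p
    rw [show (PySem.Dict.mk ((pk, pv) :: l)).items = (pk, pv) :: l from rfl,
      pvLookup_cons, PySem.Dict.get?_mk_cons]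
    by_cases h : pk = k
    · simp [h]
    · simpa [h] using ih

-- B's accumulation fold, characterised: existing entries get the (unique) delta for their
-- key added; fresh keys of l are appended with their delta.
theorem pvFold_char (l : List (String × Int)) (d : PySem.Dict String Int)
    (hd : d.keys.Nodup) (hl : (l.map (·.1)).Nodup) :
    (l.foldl (fun d p => d.insert p.1 (d.getD p.1 0 + p.2)) d).items
      = d.items.map (fun q => (q.1, q.2 + pvLookup l q.1))
        ++ l.filter (fun p => !(d.contains p.1)) := by
  induction l generalizing d with
  | nil => simp [pvLookup_nil]
  | cons p l ih =>
    simp only [List.map_cons, List.nodup_cons] at hl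
    obtain ⟨hp1, hl'⟩ := hl
    have hne : ∀ q ∈ l, q.1 ≠ p.1 := by
      intro q hq hqe
      exact hp1 (hqe ▸ List.mem_map_of_mem hq)
    rw [List.foldl_cons, ih _ (PySem.Dict.nodup_keys_insert d p.1 _ hd) hl']
    have hfil : l.filter (fun q => !((d.insert p.1 (d.getD p.1 0 + p.2)).contains q.1))
        = l.filter (fun q => !(d.contains q.1)) := by
      apply List.filter_congr
      intro q hq
      rw [PySem.Dict.contains_insert]
      simp [hne q hq]
    rw [hfil]
    by_cases hc : d.contains p.1 = true
    · rw [PySem.Dict.items_insert_of_contains _ _ hc, List.map_map]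
      have hfil2 : List.filter (fun q => !(d.contains q.1)) (p :: l)
          = l.filter (fun q => !(d.contains q.1)) := by
        rw [List.filter_cons, hc]; simp
      rw [hfil2]
      congr 1
      apply List.map_congr_left
      intro q hq
      by_cases h : q.1 = p.1
      · have hmem : (p.1, q.2) ∈ d.items := h ▸ hq
        have hval : d.getD p.1 0 = q.2 := PySem.Dict.getD_of_mem_items d hmem hd 0
        simp only [Function.comp_apply, h, beq_self_eq_true, if_pos]
        rw [pvLookup_cons, if_pos rfl, pvLookup_not_mem l p.1 hp1, hval]
        simp
      · have h' : ¬ p.1 = q.1 := fun hh => h hh.symm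
        simp [pvLookup_cons, h, h']
    · rw [PySem.Dict.items_insert_of_not_contains _ _ (by simpa using hc),
        PySem.Dict.getD_of_not_contains _ _ (by simpa using hc), List.map_append]
      have hnk : p.1 ∉ d.keys := by
        have := PySem.Dict.contains_eq_decide_mem_keys (d := d) (k := p.1)
        rw [this] at hc
        simpa using hc
      have hfil2 : List.filter (fun q => !(d.contains q.1)) (p :: l)
          = p :: l.filter (fun q => !(d.contains q.1)) := by
        rw [List.filter_cons]
        simp [hc]
      rw [hfil2]
      have hmap : d.items.map (fun q => (q.1, q.2 + pvLookup l q.1))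
          = d.items.map (fun q => (q.1, q.2 + pvLookup (p :: l) q.1)) := by
        apply List.map_congr_left
        intro q hq
        have : q.1 ≠ p.1 := by
          intro hh
          exact hnk (hh ▸ List.mem_map_of_mem hq)
        rw [pvLookup_cons, if_neg (fun hh => this hh.symm)]
      rw [← hmap]
      simp [pvLookup_not_mem l p.1 hp1]

theorem diff_tu_sizes_main (D1 D2 : PySem.Dict String Int)
    (h1 : D1.keys.Nodup) (h2 : D2.keys.Nodup) :
    ((PySem.Set.diff (PySem.Set.ofList D2.keys) (PySem.Set.ofList D1.keys)).foldl
        (fun d k => d.insert k (D2.getD k 0))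
        (D1.items.foldl (fun d p => d.insert p.1 (D2.getD p.1 0 - p.2)) PySem.Dict.empty)).items
      = ((D1.items.map (fun p => (p.1, -p.2)) ++ D2.items).foldl
          (fun d p => d.insert p.1 (d.getD p.1 0 + p.2)) PySem.Dict.empty).items := by
  have hofl1 : PySem.Set.ofList D1.keys = D1.keys := PySem.Set.ofList_eq_self_of_nodup _ h1
  have hofl2 : PySem.Set.ofList D2.keys = D2.keys := PySem.Set.ofList_eq_self_of_nodup _ h2
  have hkeys1 : D1.items.map (·.1) = D1.keys := rfl
  -- ===== A side: items = d1-part ++ remaining-part =====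
  have hfresh1 : (D1.items.foldl (fun d p => d.insert p.1 (D2.getD p.1 0 - p.2)) PySem.Dict.empty).items
      = D1.items.map (fun p => (p.1, D2.getD p.1 0 - p.2)) := by
    have := PySem.Dict.items_foldl_insert_fresh (l := D1.items) (k := (·.1))
      (v := fun p => D2.getD p.1 0 - p.2) (d := PySem.Dict.empty)
      (by intro a _; simp [PySem.Dict.contains_empty]) (by rw [hkeys1]; exact h1)
    simpa using this
  have hkeysfold : (D1.items.foldl (fun d p => d.insert p.1 (D2.getD p.1 0 - p.2)) PySem.Dict.empty).keys
      = D1.keys := by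
    have := PySem.Dict.keys_foldl_insert_key (l := D1.items) (key := (·.1))
      (f := fun d p => D2.getD p.1 0 - p.2) (d := PySem.Dict.empty)
    rw [this]
    simp [PySem.Dict.keys_empty, PySem.Set.update_nil_left, hkeys1, hofl1]
  set remaining := PySem.Set.diff (PySem.Set.ofList D2.keys) (PySem.Set.ofList D1.keys) with hrem
  have hremNodup : remaining.Nodup := PySem.Set.nodup_diff _ _ (PySem.Set.nodup_ofList _)
  have hremMem : ∀ k ∈ remaining, k ∈ D2.keys ∧ k ∉ D1.keys := by
    intro k hk
    rw [hrem] at hk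
    have := (PySem.Set.mem_diff _ _ _).mp hk
    simpa [PySem.Set.mem_ofList] using this
  have hA : ((remaining).foldl (fun d k => d.insert k (D2.getD k 0))
      (D1.items.foldl (fun d p => d.insert p.1 (D2.getD p.1 0 - p.2)) PySem.Dict.empty)).items
      = D1.items.map (fun p => (p.1, D2.getD p.1 0 - p.2))
        ++ remaining.map (fun k => (k, D2.getD k 0)) := by
    have := PySem.Dict.items_foldl_insert_fresh (l := remaining) (k := fun a => a)
      (v := fun k => D2.getD k 0)
      (d := D1.items.foldl (fun d p => d.insert p.1 (D2.getD p.1 0 - p.2)) PySem.Dict.empty)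
      (by intro a ha
          rw [PySem.Dict.contains_eq_decide_mem_keys, hkeysfold]
          simp [(hremMem a ha).2])
      (by simpa using hremNodup)
    rw [hfresh1] at this
    simpa using this
  rw [hA]
  -- ===== B side: one aggregation fold over the delta stream =====
  set l1 := D1.items.map (fun p => (p.1, -p.2)) with hl1
  have hl1keys : l1.map (·.1) = D1.keys := by rw [hl1, List.map_map]; rfl
  rw [List.foldl_append]
  set acc1 := l1.foldl (fun d p => d.insert p.1 (d.getD p.1 0 + p.2)) PySem.Dict.empty with hacc1
  have hb1 : acc1.items = l1 := by
    rw [hacc1, pvFold_char l1 PySem.Dict.empty (PySem.Dict.nodup_keys_empty)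
      (by rw [hl1keys]; exact h1)]
    have hemp : (PySem.Dict.empty : PySem.Dict String Int).items = [] := rfl
    simp [hemp, PySem.Dict.contains_empty]
  have hacc1keys : acc1.keys = D1.keys := by
    have : acc1.keys = acc1.items.map (·.1) := rfl
    rw [this, hb1, hl1keys]
  have hacc1nodup : acc1.keys.Nodup := by rw [hacc1keys]; exact h1
  rw [pvFold_char D2.items acc1 hacc1nodup (by exact h2), hb1]
  congr 1
  · -- mapped d1-part
    rw [hl1, List.map_map]
    apply List.map_congr_left
    intro p _
    simp [pvLookup_items, sub_eq_neg_add]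
  · -- appended d2-only part
    have hremeq : remaining = D2.keys.filter (fun y => !(PySem.Set.contains D1.keys y)) := by
      rw [hrem, hofl1, hofl2]; rfl
    have hcont : ∀ q : String × Int, acc1.contains q.1 = decide (q.1 ∈ D1.keys) := by
      intro q
      rw [PySem.Dict.contains_eq_decide_mem_keys, hacc1keys]
    have hkeys2 : D2.keys = D2.items.map (·.1) := rfl
    rw [hremeq, hkeys2, List.filter_map, List.map_map]
    have hstep : List.map ((fun k => (k, D2.getD k 0)) ∘ (·.1))
        (D2.items.filter ((fun y => !(PySem.Set.contains D1.keys y)) ∘ (·.1)))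
        = D2.items.filter ((fun y => !(PySem.Set.contains D1.keys y)) ∘ (·.1)) := by
      have h' : ∀ p ∈ D2.items.filter ((fun y => !(PySem.Set.contains D1.keys y)) ∘ (·.1)),
          ((fun k => (k, D2.getD k 0)) ∘ (·.1)) p = id p := by
        intro p hp
        have hpmem : p ∈ D2.items := List.mem_of_mem_filter hp
        have : D2.getD p.1 0 = p.2 :=
          PySem.Dict.getD_of_mem_items D2 (k := p.1) (v := p.2) (by simpa using hpmem) h2 0
        simp [this]
      rw [List.map_congr_left h', List.map_id]
    rw [hstep]
    apply List.filter_congr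
    intro p _
    rw [hcont p]
    simp

-- ===== VERDICT (by name: the statement is the Claim_ definition above) =====
theorem diff_tu_sizes_spec : Claim_equal_diff_tu_sizes := by
  intro d1 d2 _
  unfold Spec_diff_tu_sizes diff_tu_sizes diff_tu_sizes_alt
  exact diff_tu_sizes_main (PySem.Dict.ofList d1) (PySem.Dict.ofList d2)
    (PySem.Dict.nodup_keys_ofList d1) (PySem.Dict.nodup_keys_ofList d2)
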